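-- pv_equiv track=rewrite | github.com/matrix-lab/machine-learning | lipeng/cn-python-foundation-master/investigate texts and calls/ZH/Task4.py | get_phone_mark_users
-- ===== SOURCE A (Python) =====
-- def get_called_numbers(calls):
--     mobiles = set()
--     for call in calls:
--         mobiles.add(call[1])
--
--     return mobiles
--
-- def get_text_mobile_numebers(texts):
--     text_mobiles = set()
--     for text in texts:
--         text_mobiles.add(text[0])
--         text_mobiles.add(text[1])
--     return text_mobiles
--
-- def get_phone_mark_users(calls, texts):
--     called_mobiles = get_called_numbers(calls)
--     text_mobiles = get_text_mobile_numebers(texts)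
--     find_phones = set()
--     for call in calls:
--         if (call[0] not in called_mobiles) and (call[0] not in text_mobiles):
--             find_phones.add(call[0])
--     return sorted(list(find_phones))
-- ===== SOURCE B (Python) =====
-- def get_phone_mark_users(calls, texts):
--     # One-pass status dictionary: True = candidate initiator, False = banned.
--     # A ban (being called, or appearing in a text) always overwrites;
--     # a candidacy is only recorded if the number has no status yet,
--     # so it can never resurrect a banned number.
--     status = {}
--     for a, b in calls:
--         if a not in status:
--             status[a] = True
--         status[b] = False
--     for a, b in texts:
--         status[a] = False
--         status[b] = False
--     return sorted(k for k, v in status.items() if v)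
-- ===== Notes on version B (the rewrite author's own statement) =====
-- stated objective: alternative
-- what changed: Replaces A's three staged passes (build called-set, build texted-set, then filter calls against both) with a single status dictionary built in one flag-merging sweep (callers tentatively True unless already seen, any callee/text endpoint permanently False), emitting the keys still True.
import Mathlib
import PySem

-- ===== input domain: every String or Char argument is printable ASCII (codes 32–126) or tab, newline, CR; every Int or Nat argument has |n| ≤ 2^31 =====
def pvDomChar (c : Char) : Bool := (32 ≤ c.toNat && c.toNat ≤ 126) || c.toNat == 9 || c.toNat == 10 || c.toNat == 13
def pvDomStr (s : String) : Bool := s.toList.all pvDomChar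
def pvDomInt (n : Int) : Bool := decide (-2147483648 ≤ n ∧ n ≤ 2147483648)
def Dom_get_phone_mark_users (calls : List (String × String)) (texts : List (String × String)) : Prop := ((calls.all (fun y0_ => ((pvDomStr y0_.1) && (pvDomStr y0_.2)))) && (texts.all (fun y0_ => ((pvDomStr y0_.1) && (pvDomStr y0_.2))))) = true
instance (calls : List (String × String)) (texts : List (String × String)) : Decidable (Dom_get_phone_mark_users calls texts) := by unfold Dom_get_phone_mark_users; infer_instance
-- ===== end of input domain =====

-- B replaces A's three staged passes (build two sets, then filter calls against them) with a
-- single flag-merging status dictionary (alternative decomposition); return values proved equal.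

-- ===== PORT A =====
def get_called_numbers (calls : List (String × String)) : PySem.Set String :=
  calls.foldl (fun mobiles call => PySem.Set.add mobiles call.2) PySem.Set.empty

def get_text_mobile_numebers (texts : List (String × String)) : PySem.Set String :=
  texts.foldl (fun tm text => PySem.Set.add (PySem.Set.add tm text.1) text.2) PySem.Set.empty

def get_phone_mark_users (calls : List (String × String)) (texts : List (String × String)) : List String :=
  let called_mobiles := get_called_numbers calls
  let text_mobiles := get_text_mobile_numebers texts
  let find_phones := calls.foldl (fun fp call =>
    if ¬ (PySem.Set.contains called_mobiles call.1) ∧ ¬ (PySem.Set.contains text_mobiles call.1)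
    then PySem.Set.add fp call.1 else fp) PySem.Set.empty
  PySem.List.sorted find_phones (fun x => x) false

-- ===== PORT B =====
def get_phone_mark_users_alt (calls : List (String × String)) (texts : List (String × String)) : List String :=
  let status := calls.foldl (fun st c =>
    PySem.Dict.insert
      (if (PySem.Dict.get? st c.1).isNone then PySem.Dict.insert st c.1 true else st)
      c.2 false) (PySem.Dict.empty)
  let status := texts.foldl (fun st t =>
    PySem.Dict.insert (PySem.Dict.insert st t.1 false) t.2 false) status
  PySem.List.sorted ((status.items.filter (fun kv => kv.2)).map Prod.fst) (fun x => x) false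

-- ===== PRECONDITION & SPEC =====
def Spec_get_phone_mark_users (calls : List (String × String)) (texts : List (String × String)) (out : List String) : Prop := out = get_phone_mark_users_alt calls texts
instance (calls : List (String × String)) (texts : List (String × String)) (out : List String) : Decidable (Spec_get_phone_mark_users calls texts out) := by unfold Spec_get_phone_mark_users; infer_instance

-- ===== CLAIM (what is proved, stated in full; the proofs are below) =====
def Claim_equal_get_phone_mark_users : Prop := ∀ (calls : List (String × String)) (texts : List (String × String)), Dom_get_phone_mark_users calls texts → Spec_get_phone_mark_users calls texts (get_phone_mark_users calls texts)

-- ===== LEMMAS AND PROOFS =====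

-- A side: membership/nodup of A's conditional-add filter loop.
theorem mem_foldl_filter_add {α β : Type} [BEq α] [LawfulBEq α] (p : α → Prop) [DecidablePred p]
    (f : β → α) (xs : List β) (s : PySem.Set α) (y : α) :
    y ∈ xs.foldl (fun fp c => if p (f c) then PySem.Set.add fp (f c) else fp) s ↔
      y ∈ s ∨ (y ∈ xs.map f ∧ p y) := by
  induction xs generalizing s with
  | nil => simp
  | cons x t ih =>
    simp only [List.foldl, ih, List.map_cons, List.mem_cons]
    split_ifs with hx
    · rw [PySem.Set.mem_add]
      constructor
      · rintro (⟨h | rfl⟩ | ⟨h1, h2⟩)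
        · exact Or.inl h
        · exact Or.inr ⟨Or.inl rfl, hx⟩
        · exact Or.inr ⟨Or.inr h1, h2⟩
      · rintro (h | ⟨(rfl | h1), h2⟩)
        · exact Or.inl (Or.inl h)
        · exact Or.inl (Or.inr rfl)
        · exact Or.inr ⟨h1, h2⟩
    · constructor
      · rintro (h | ⟨h1, h2⟩)
        · exact Or.inl h
        · exact Or.inr ⟨Or.inr h1, h2⟩
      · rintro (h | ⟨(rfl | h1), h2⟩)
        · exact Or.inl h
        · exact absurd h2 hx
        · exact Or.inr ⟨h1, h2⟩

theorem nodup_foldl_filter_add {α β : Type} [BEq α] [LawfulBEq α] (p : α → Prop) [DecidablePred p]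
    (f : β → α) (xs : List β) (s : PySem.Set α) (hs : s.Nodup) :
    (xs.foldl (fun fp c => if p (f c) then PySem.Set.add fp (f c) else fp) s).Nodup := by
  induction xs generalizing s with
  | nil => exact hs
  | cons x t ih =>
    simp only [List.foldl]
    split_ifs with hx
    · exact ih _ (PySem.Set.nodup_add _ _ hs)
    · exact ih _ hs

theorem mem_called (calls : List (String × String)) (y : String) :
    y ∈ get_called_numbers calls ↔ y ∈ calls.map Prod.snd := by
  unfold get_called_numbers
  induction calls using List.reverseRecOn with
  | nil => simp
  | append_singleton t x ih =>
    simp only [PySem.Set.empty] at ih ⊢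
    simp [List.foldl_append, PySem.Set.mem_add, ih]

theorem mem_texted (texts : List (String × String)) (y : String) :
    y ∈ get_text_mobile_numebers texts ↔ y ∈ texts.flatMap (fun t => [t.1, t.2]) := by
  unfold get_text_mobile_numebers
  induction texts using List.reverseRecOn with
  | nil => simp
  | append_singleton t x ih =>
    simp only [PySem.Set.empty] at ih ⊢
    simp [List.foldl_append, PySem.Set.mem_add, ih]
    rw [or_assoc]

-- B side: the status dictionary after the calls pass, as a lookup closed form.
theorem get?_calls_fold (calls : List (String × String)) (st : PySem.Dict String Bool)
    (k : String) :
    PySem.Dict.get? (calls.foldl (fun st c =>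
      PySem.Dict.insert
        (if (PySem.Dict.get? st c.1).isNone then PySem.Dict.insert st c.1 true else st)
        c.2 false) st) k =
      if k ∈ calls.map Prod.snd then some false
      else if k ∈ calls.map Prod.fst then some ((PySem.Dict.get? st k).getD true)
      else PySem.Dict.get? st k := by
  induction calls generalizing st with
  | nil => simp
  | cons c t ih =>
    simp only [List.foldl, ih, List.map_cons, List.mem_cons]
    have hst1 : ∀ (x : String),
        PySem.Dict.get? (PySem.Dict.insert
          (if (PySem.Dict.get? st c.1).isNone then PySem.Dict.insert st c.1 true else st)
          c.2 false) x =
        if x = c.2 then some false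
        else if x = c.1 then some ((PySem.Dict.get? st x).getD true)
        else PySem.Dict.get? st x := by
      intro x
      by_cases h2 : x = c.2
      · simp [PySem.Dict.get?_insert, h2]
      · by_cases h1 : x = c.1
        · cases hg : PySem.Dict.get? st c.1 with
          | none => simp [PySem.Dict.get?_insert, h2, h1, hg]
          | some v => simp [PySem.Dict.get?_insert, h2, h1, hg]
        · split_ifs with hn <;> simp [PySem.Dict.get?_insert, h2, h1]
    by_cases hb : k = c.2 <;> by_cases h1 : k = c.1 <;>
      by_cases hs2 : k ∈ t.map Prod.snd <;> by_cases hs1 : k ∈ t.map Prod.fst <;>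
      simp_all [hst1 k]

-- B side: the texts pass bans every endpoint, leaves the rest.
theorem get?_texts_fold (texts : List (String × String)) (st : PySem.Dict String Bool)
    (k : String) :
    PySem.Dict.get? (texts.foldl (fun st t =>
      PySem.Dict.insert (PySem.Dict.insert st t.1 false) t.2 false) st) k =
      if k ∈ texts.flatMap (fun t => [t.1, t.2]) then some false
      else PySem.Dict.get? st k := by
  induction texts generalizing st with
  | nil => simp
  | cons c t ih =>
    simp only [List.foldl, ih, List.flatMap_cons, List.mem_append, List.mem_cons]
    by_cases hm : k ∈ t.flatMap (fun t => [t.1, t.2])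
    · simp [hm]
    · by_cases h2 : k = c.2
      · simp [h2, PySem.Dict.get?_insert]
      · by_cases h1 : k = c.1 <;>
          simp [hm, h1, h2, PySem.Dict.get?_insert]

-- keys stay Nodup through any sequence of inserts.
theorem nodup_keys_calls_fold (calls : List (String × String)) (st : PySem.Dict String Bool)
    (h : st.keys.Nodup) :
    (calls.foldl (fun st c =>
      PySem.Dict.insert
        (if (PySem.Dict.get? st c.1).isNone then PySem.Dict.insert st c.1 true else st)
        c.2 false) st).keys.Nodup := by
  induction calls generalizing st with
  | nil => exact h
  | cons c t ih =>
    simp only [List.foldl]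
    apply ih
    apply PySem.Dict.nodup_keys_insert
    split_ifs with hx
    · exact PySem.Dict.nodup_keys_insert _ _ _ h
    · exact h

theorem nodup_keys_texts_fold (texts : List (String × String)) (st : PySem.Dict String Bool)
    (h : st.keys.Nodup) :
    (texts.foldl (fun st t =>
      PySem.Dict.insert (PySem.Dict.insert st t.1 false) t.2 false) st).keys.Nodup := by
  induction texts generalizing st with
  | nil => exact h
  | cons c t ih =>
    exact ih _ (PySem.Dict.nodup_keys_insert _ _ _ (PySem.Dict.nodup_keys_insert _ _ _ h))

-- Keys of the true-flagged items ↔ get? = some true (nodup keys).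
theorem mem_true_items {d : PySem.Dict String Bool} (hnd : d.keys.Nodup) (k : String) :
    k ∈ (d.items.filter (fun kv => kv.2)).map Prod.fst ↔ PySem.Dict.get? d k = some true := by
  constructor
  · intro h
    obtain ⟨⟨k', v⟩, hmem, rfl⟩ := List.mem_map.1 h
    rw [List.mem_filter] at hmem
    have hv : v = true := by simpa using hmem.2
    subst hv
    exact PySem.Dict.get?_of_mem_items _ hmem.1 hnd
  · intro h
    refine List.mem_map.2 ⟨(k, true), List.mem_filter.2 ⟨?_, rfl⟩, rfl⟩
    exact PySem.Dict.mem_items_of_get?_eq_some _ h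

theorem nodup_true_items {d : PySem.Dict String Bool} (hnd : d.keys.Nodup) :
    ((d.items.filter (fun kv => kv.2)).map Prod.fst).Nodup := by
  exact hnd.sublist (List.Sublist.map _ List.filter_sublist)

-- ===== VERDICT (by name: the statement is the Claim_ definition above) =====
theorem get_phone_mark_users_spec : Claim_equal_get_phone_mark_users := by
  intro calls texts _
  unfold Spec_get_phone_mark_users get_phone_mark_users get_phone_mark_users_alt
  have hndB : (texts.foldl (fun st t =>
      PySem.Dict.insert (PySem.Dict.insert st t.1 false) t.2 false)
      (calls.foldl (fun st c =>
        PySem.Dict.insert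
          (if (PySem.Dict.get? st c.1).isNone then PySem.Dict.insert st c.1 true else st)
          c.2 false) PySem.Dict.empty)).keys.Nodup :=
    nodup_keys_texts_fold _ _ (nodup_keys_calls_fold _ _ (by simp))
  apply PySem.List.sorted_eq_sorted_of_perm _ _ _ (fun a b h => h)
  refine (List.perm_ext_iff_of_nodup
    (nodup_foldl_filter_add
      (fun z => ¬ (PySem.Set.contains (get_called_numbers calls) z) ∧
                ¬ (PySem.Set.contains (get_text_mobile_numebers texts) z))
      Prod.fst calls PySem.Set.empty List.nodup_nil)
    (nodup_true_items hndB)).2 ?_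
  intro y
  rw [mem_foldl_filter_add
    (fun z => ¬ (PySem.Set.contains (get_called_numbers calls) z) ∧
              ¬ (PySem.Set.contains (get_text_mobile_numebers texts) z)),
    mem_true_items hndB, get?_texts_fold, get?_calls_fold]
  simp only [PySem.Set.contains_iff, mem_called, mem_texted, PySem.Dict.get?_empty]
  by_cases ht : y ∈ texts.flatMap (fun t => [t.1, t.2]) <;>
    by_cases hc2 : y ∈ calls.map Prod.snd <;>
    by_cases hc1 : y ∈ calls.map Prod.fst <;>
    simp [ht, hc2, hc1]
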